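-- pv_equiv track=rewrite | github.com/videscar/dogv-ai | scripts/run_eval.py | _compute_hits
-- ===== SOURCE A (Python) =====
-- def _compute_hits(doc_ids: list[int], gold_sets: list[list[int]], k_values: list[int]) -> dict[str, bool]:
--     hits: dict[str, bool] = {}
--     if not gold_sets:
--         for k in k_values:
--             hits[str(k)] = False
--         return hits
--     gold = [set(group) for group in gold_sets if group]
--     if not gold:
--         for k in k_values:
--             hits[str(k)] = False
--         return hits
--     for k in k_values:
--         topk = set(doc_ids[:k])
--         hits[str(k)] = any(group.issubset(topk) for group in gold)
--     return hits
-- ===== SOURCE B (Python) =====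
-- def _compute_hits(doc_ids: list[int], gold_sets: list[list[int]], k_values: list[int]) -> dict[str, bool]:
--     """Hits@k via a single threshold: a gold group is covered by the top-k docs
--     iff the largest first-occurrence index of its members is below k; the
--     minimum of that over the groups answers every k with one comparison."""
--     first: dict[int, int] = {}
--     for i, d in enumerate(doc_ids):
--         first.setdefault(d, i)
--     best = None
--     for group in gold_sets:
--         if group and all(g in first for g in group):
--             need = max(first[g] for g in group)
--             if best is None or need < best:
--                 best = need
--     return {str(k): best is not None and best < k for k in k_values}
-- ===== Notes on version B (the rewrite author's own statement) =====
-- stated objective: faster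
-- what changed: Instead of building a top-k id set and scanning every gold group for each k, B precomputes each id's first-occurrence index once, reduces every coverable gold group to the max index of its members and keeps the min over groups as a single threshold, so each k is answered by one comparison.
-- intended difference: For a negative k in k_values where some nonempty gold group lies entirely within the first len(doc_ids)+k documents, A reports a hit because doc_ids[:k] silently drops the tail (an accident of Python slicing), while B reports False, the intended value since a non-positive cutoff retrieves no documents. — e.g. on _compute_hits([1, 2], [[1]], [-1]): A returns [("-1", true)], B returns [("-1", false)]
import Mathlib
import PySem

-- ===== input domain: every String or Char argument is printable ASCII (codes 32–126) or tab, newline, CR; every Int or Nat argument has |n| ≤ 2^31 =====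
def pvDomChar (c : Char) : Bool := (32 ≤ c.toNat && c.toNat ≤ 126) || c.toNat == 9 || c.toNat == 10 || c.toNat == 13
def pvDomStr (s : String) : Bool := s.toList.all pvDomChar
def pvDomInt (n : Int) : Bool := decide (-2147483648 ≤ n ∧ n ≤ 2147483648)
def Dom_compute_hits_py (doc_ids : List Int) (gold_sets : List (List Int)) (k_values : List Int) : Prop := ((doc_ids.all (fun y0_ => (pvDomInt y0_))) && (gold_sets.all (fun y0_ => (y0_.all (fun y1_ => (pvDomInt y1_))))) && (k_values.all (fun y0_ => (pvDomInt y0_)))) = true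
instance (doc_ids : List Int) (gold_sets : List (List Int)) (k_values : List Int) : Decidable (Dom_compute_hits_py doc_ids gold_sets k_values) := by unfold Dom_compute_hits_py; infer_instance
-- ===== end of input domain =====

-- B replaces the per-k set-subset scan by a first-occurrence index map and a single
-- min-over-groups threshold, answering each k by one comparison (asymptotically faster).

-- ===== PORT A =====
def compute_hits_py (doc_ids : List Int) (gold_sets : List (List Int)) (k_values : List Int) : List (String × Bool) :=
  if gold_sets = [] then
    (k_values.foldl (fun h k => h.insert (PySem.Int.toStr k) false)
      (PySem.Dict.empty : PySem.Dict String Bool)).items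
  else
    let gold := (gold_sets.filter (fun group => !group.isEmpty)).map
      (fun group => PySem.Set.ofList group)
    if gold = [] then
      (k_values.foldl (fun h k => h.insert (PySem.Int.toStr k) false)
        (PySem.Dict.empty : PySem.Dict String Bool)).items
    else
      (k_values.foldl (fun h k =>
        let topk := PySem.Set.ofList (PySem.List.slice doc_ids none (some k))
        h.insert (PySem.Int.toStr k) (gold.any (fun group => PySem.Set.issubset group topk)))
        (PySem.Dict.empty : PySem.Dict String Bool)).items

-- ===== PORT B =====
-- first.setdefault(d, i) over enumerate(doc_ids)
def pvFirst (doc_ids : List Int) : PySem.Dict Int Int :=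
  (PySem.List.enumerate doc_ids 0).foldl
    (fun d p => d.setdefault p.2 p.1)
    (PySem.Dict.empty : PySem.Dict Int Int)

-- the 'for group in gold_sets' loop keeping the running minimum threshold;
-- the 'match … | none => best' arm is unreachable (the guard makes the max nonempty)
def pvBestStep (first : PySem.Dict Int Int) (best : Option Int) (group : List Int) : Option Int :=
  if !group.isEmpty && group.all (fun g => first.contains g) then
    match PySem.List.max? (group.map (fun g => first.getD g 0)) (fun x => x) with
    | none => best
    | some need =>
      match best with
      | none => some need
      | some b => if need < b then some need else best
  else best

def pvBestB (first : PySem.Dict Int Int) (gold_sets : List (List Int)) : Option Int :=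
  gold_sets.foldl (pvBestStep first) none

def compute_hits_py_alt (doc_ids : List Int) (gold_sets : List (List Int)) (k_values : List Int) : List (String × Bool) :=
  let first := pvFirst doc_ids
  let best := pvBestB first gold_sets
  (k_values.foldl (fun h k => h.insert (PySem.Int.toStr k)
      (match best with | none => false | some b => decide (b < k)))
    (PySem.Dict.empty : PySem.Dict String Bool)).items

-- ===== PRECONDITION & SPEC =====
-- For a negative k in k_values where some nonempty gold group lies entirely within the first
-- len(doc_ids)+k documents, A reports a hit (doc_ids[:k] silently drops the tail, an accident of
-- Python slicing), while B reports False, the intended value: a non-positive cutoff retrieves nothing.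
def D_compute_hits_py (doc_ids : List Int) (gold_sets : List (List Int)) (k_values : List Int) : Prop :=
  ∃ k ∈ k_values, k < 0 ∧ ∃ group ∈ gold_sets, group ≠ [] ∧
    ∀ g ∈ group, g ∈ doc_ids.take (doc_ids.length - (-k).toNat)
instance (doc_ids : List Int) (gold_sets : List (List Int)) (k_values : List Int) : Decidable (D_compute_hits_py doc_ids gold_sets k_values) := by unfold D_compute_hits_py; infer_instance

def Spec_compute_hits_py (doc_ids : List Int) (gold_sets : List (List Int)) (k_values : List Int) (out : List (String × Bool)) : Prop := ¬ D_compute_hits_py doc_ids gold_sets k_values → out = compute_hits_py_alt doc_ids gold_sets k_values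
instance (doc_ids : List Int) (gold_sets : List (List Int)) (k_values : List Int) (out : List (String × Bool)) : Decidable (Spec_compute_hits_py doc_ids gold_sets k_values out) := by unfold Spec_compute_hits_py; infer_instance

def pvDiffWitness_compute_hits_py : List Int × List (List Int) × List Int := ([1, 2], [[1]], [-1])
def pvDiffWitnessOut_compute_hits_py : (List (String × Bool)) × (List (String × Bool)) :=
  ([("-1", true)], [("-1", false)])

-- ===== CLAIM (what is proved, stated in full; the proofs are below) =====
def Claim_unchanged_compute_hits_py : Prop := ∀ (doc_ids : List Int) (gold_sets : List (List Int)) (k_values : List Int), Dom_compute_hits_py doc_ids gold_sets k_values → Spec_compute_hits_py doc_ids gold_sets k_values (compute_hits_py doc_ids gold_sets k_values)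
def Claim_changed_compute_hits_py : Prop := Dom_compute_hits_py (pvDiffWitness_compute_hits_py.1) (pvDiffWitness_compute_hits_py.2.1) (pvDiffWitness_compute_hits_py.2.2) ∧ D_compute_hits_py (pvDiffWitness_compute_hits_py.1) (pvDiffWitness_compute_hits_py.2.1) (pvDiffWitness_compute_hits_py.2.2) ∧ compute_hits_py (pvDiffWitness_compute_hits_py.1) (pvDiffWitness_compute_hits_py.2.1) (pvDiffWitness_compute_hits_py.2.2) = pvDiffWitnessOut_compute_hits_py.1 ∧ compute_hits_py_alt (pvDiffWitness_compute_hits_py.1) (pvDiffWitness_compute_hits_py.2.1) (pvDiffWitness_compute_hits_py.2.2) = pvDiffWitnessOut_compute_hits_py.2 ∧ pvDiffWitnessOut_compute_hits_py.1 ≠ pvDiffWitnessOut_compute_hits_py.2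

-- ===== LEMMAS AND PROOFS =====

-- the prefix length len(doc_ids[:k]) as a function of len and k
def pvCut (n : Nat) (k : Int) : Nat := if 0 ≤ k then min k.toNat n else n - (-k).toNat

theorem pvSlice_cut (xs : List Int) (k : Int) :
    PySem.List.slice xs none (some k) = xs.take (pvCut xs.length k) := by
  unfold pvCut
  by_cases hk : 0 ≤ k
  · rw [if_pos hk, PySem.List.slice_to xs hk, List.take_eq_take_iff]
    omega
  · rw [if_neg hk]
    have h2 := PySem.List.slice_to_neg_natCast xs (-k).toNat (by omega)
    rw [show -(((-k).toNat : Nat) : Int) = k from by omega] at h2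
    exact h2

theorem mem_take_iff_index? (l : List Int) (x : Int) (m : Nat) :
    x ∈ l.take m ↔ ∃ j, PySem.List.index? l x = some j ∧ j < m := by
  constructor
  · intro h
    rw [List.mem_take_iff_getElem] at h
    obtain ⟨i, hi, hx⟩ := h
    have hmem : x ∈ l := List.mem_of_getElem hx
    have hne : PySem.List.index? l x ≠ none := by
      rw [Ne, PySem.List.index?_eq_none_iff]; exact fun h => h hmem
    obtain ⟨j, hj⟩ := Option.ne_none_iff_exists'.mp hne
    refine ⟨j, hj, ?_⟩
    obtain ⟨hjl, hxj, hmin⟩ := PySem.List.getElem_of_index?_eq_some hj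
    by_contra hge
    exact hmin i (by omega) hx
  · rintro ⟨j, hj, hjm⟩
    obtain ⟨hjl, hxj, _⟩ := PySem.List.getElem_of_index?_eq_some hj
    rw [List.mem_take_iff_getElem]
    exact ⟨j, by omega, hxj⟩

theorem pvFirst_get? (doc_ids : List Int) (x : Int) :
    (pvFirst doc_ids).get? x = Option.map (fun (j : Nat) => (j : Int)) (PySem.List.index? doc_ids x) := by
  induction doc_ids using List.reverseRecOn generalizing x with
  | nil => simp [pvFirst, PySem.List.enumerate_nil, PySem.List.index?, PySem.Dict.get?_empty]
  | append_singleton xs y ih =>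
    have hstep : pvFirst (xs ++ [y]) = (pvFirst xs).setdefault y (xs.length : Int) := by
      unfold pvFirst
      rw [PySem.List.enumerate_append, List.foldl_append]
      simp [PySem.List.enumerate_cons, PySem.List.enumerate_nil]
    rw [hstep]
    by_cases hmem : y ∈ xs
    · have hc : (pvFirst xs).contains y = true := by
        rw [PySem.Dict.contains_eq_isSome_get?, ih y]
        have : PySem.List.index? xs y ≠ none := by
          rw [Ne, PySem.List.index?_eq_none_iff]; exact fun h => h hmem
        obtain ⟨j, hj⟩ := Option.ne_none_iff_exists'.mp this
        rw [hj]; rfl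
      have hsd : (pvFirst xs).setdefault y (xs.length : Int) = pvFirst xs := by
        simp [PySem.Dict.setdefault, hc]
      rw [hsd, ih x]
      by_cases hxy : x ∈ xs
      · rw [PySem.List.index?_append_of_mem [y] hxy]
      · have h1 : PySem.List.index? xs x = none := (PySem.List.index?_eq_none_iff _ _).mpr hxy
        by_cases hx : x = y
        · subst hx
          rw [PySem.List.index?_append_of_mem [x] hmem, h1]
        · have h2 : PySem.List.index? (xs ++ [y]) x = none := by
            rw [PySem.List.index?_eq_none_iff]
            simp [hxy, hx]
          rw [h1, h2]
    · have hc : (pvFirst xs).contains y = false := by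
        rw [PySem.Dict.contains_eq_isSome_get?, ih y]
        rw [(PySem.List.index?_eq_none_iff _ _).mpr hmem]; rfl
      have hsd : (pvFirst xs).setdefault y (xs.length : Int) = (pvFirst xs).insert y (xs.length : Int) := by
        simp [PySem.Dict.setdefault, PySem.Dict.insert, hc]
      rw [hsd]
      by_cases hx : x = y
      · subst hx
        rw [PySem.Dict.get?_insert_self, PySem.List.index?_append_singleton_self xs x hmem]
        rfl
      · rw [PySem.Dict.get?_insert_of_ne _ _ hx, ih x]
        by_cases hxy : x ∈ xs
        · rw [PySem.List.index?_append_of_mem [y] hxy]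
        · have h1 : PySem.List.index? xs x = none := (PySem.List.index?_eq_none_iff _ _).mpr hxy
          have h2 : PySem.List.index? (xs ++ [y]) x = none := by
            rw [PySem.List.index?_eq_none_iff]; simp [hxy, hx]
          rw [h1, h2]

theorem pvBestB_lt_iff (first : PySem.Dict Int Int) (m : Int) (gold_sets : List (List Int)) :
    (∃ b, pvBestB first gold_sets = some b ∧ b < m) ↔
      ∃ group ∈ gold_sets, group ≠ [] ∧ ∀ g ∈ group, ∃ i, first.get? g = some i ∧ i < m := by
  unfold pvBestB
  suffices h : ∀ (l : List (List Int)) (acc : Option Int),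
      (∃ b, (l.foldl (pvBestStep first) acc) = some b ∧ b < m) ↔
      ((∃ b, acc = some b ∧ b < m) ∨
        ∃ group ∈ l, group ≠ [] ∧ ∀ g ∈ group, ∃ i, first.get? g = some i ∧ i < m) by
    rw [h gold_sets none]
    simp
  intro l
  induction l with
  | nil => intro acc; simp
  | cons group rest ih =>
    intro acc
    rw [List.foldl_cons]
    by_cases hc : (!group.isEmpty && group.all (fun g => first.contains g)) = true
    · have hsplit := hc
      simp only [Bool.and_eq_true, List.all_eq_true] at hsplit
      obtain ⟨h1, h2⟩ := hsplit
      have hne : group ≠ [] := by simpa [List.isEmpty_iff] using h1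
      have hallc : ∀ g ∈ group, first.contains g = true := h2
      obtain ⟨need, hmax⟩ : ∃ need,
          PySem.List.max? (group.map (fun g => first.getD g 0)) (fun x => x) = some need := by
        cases h : PySem.List.max? (group.map (fun g => first.getD g 0)) (fun x => x) with
        | none =>
          have := (PySem.List.max?_eq_none_iff _ _).mp h
          exact absurd this (by simp [hne])
        | some n => exact ⟨n, rfl⟩
      have hstep_none : pvBestStep first none group = some need := by
        unfold pvBestStep
        rw [if_pos hc, hmax]
      have hstep_some : ∀ b, pvBestStep first (some b) group =
          if need < b then some need else some b := by
        intro b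
        unfold pvBestStep
        rw [if_pos hc, hmax]
      have hQ : need < m ↔ ∀ g ∈ group, ∃ i, first.get? g = some i ∧ i < m := by
        constructor
        · intro hlt g hg
          have hcg := hallc g hg
          rw [PySem.Dict.contains_eq_isSome_get?] at hcg
          obtain ⟨i, hi⟩ := Option.isSome_iff_exists.mp hcg
          refine ⟨i, hi, ?_⟩
          have hgd : first.getD g 0 = i := by
            rw [PySem.Dict.getD_eq_get?_getD, hi]; rfl
          have hle := PySem.List.max?_isMax hmax (first.getD g 0)
            (List.mem_map_of_mem hg)
          simp only at hle
          omega
        · intro hallm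
          have hmem := PySem.List.max?_mem hmax
          obtain ⟨g0, hg0, hval⟩ := List.mem_map.mp hmem
          obtain ⟨i, hi, him⟩ := hallm g0 hg0
          have : first.getD g0 0 = i := by
            rw [PySem.Dict.getD_eq_get?_getD, hi]; rfl
          omega
      rcases acc with _ | b
      · rw [hstep_none, ih (some need)]
        constructor
        · rintro (⟨b', hb', hm'⟩ | ⟨gr, hgr, hx⟩)
          · injection hb' with hb'; subst hb'
            exact Or.inr ⟨group, List.mem_cons_self .., hne, hQ.mp hm'⟩
          · exact Or.inr ⟨gr, List.mem_cons_of_mem _ hgr, hx⟩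
        · rintro (⟨b', hb', hm'⟩ | ⟨gr, hgr, hne', hx⟩)
          · exact absurd hb' (by simp)
          · rcases List.mem_cons.mp hgr with rfl | hgr
            · exact Or.inl ⟨need, rfl, hQ.mpr hx⟩
            · exact Or.inr ⟨gr, hgr, hne', hx⟩
      · rw [hstep_some b, ih (if need < b then some need else some b)]
        constructor
        · rintro (⟨b', hb', hm'⟩ | ⟨gr, hgr, hx⟩)
          · split_ifs at hb' with hnb
            · injection hb' with hb'; subst hb'
              exact Or.inr ⟨group, List.mem_cons_self .., hne, hQ.mp hm'⟩
            · injection hb' with hb'; subst hb'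
              exact Or.inl ⟨b, rfl, hm'⟩
          · exact Or.inr ⟨gr, List.mem_cons_of_mem _ hgr, hx⟩
        · rintro (⟨b', hb', hm'⟩ | ⟨gr, hgr, hne', hx⟩)
          · injection hb' with hb'; subst hb'
            refine Or.inl ?_
            split_ifs with hnb
            · exact ⟨need, rfl, by omega⟩
            · exact ⟨b, rfl, hm'⟩
          · rcases List.mem_cons.mp hgr with rfl | hgr
            · have hm' : need < m := hQ.mpr hx
              refine Or.inl ?_
              split_ifs with hnb
              · exact ⟨need, rfl, hm'⟩
              · exact ⟨b, rfl, by omega⟩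
            · exact Or.inr ⟨gr, hgr, hne', hx⟩
    · have hskip : pvBestStep first acc group = acc := by
        unfold pvBestStep
        rw [if_neg hc]
      rw [hskip, ih acc]
      have hng : ¬ (group ≠ [] ∧ ∀ g ∈ group, ∃ i, first.get? g = some i ∧ i < m) := by
        rintro ⟨hne, hall⟩
        apply hc
        rw [Bool.and_eq_true]
        refine ⟨by simpa [List.isEmpty_iff] using hne, ?_⟩
        rw [List.all_eq_true]
        intro g hg
        obtain ⟨i, hi, -⟩ := hall g hg
        rw [PySem.Dict.contains_eq_isSome_get?, hi]
        rfl
      constructor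
      · rintro (h1 | ⟨gr, hgr, hx⟩)
        · exact Or.inl h1
        · exact Or.inr ⟨gr, List.mem_cons_of_mem _ hgr, hx⟩
      · rintro (h1 | ⟨gr, hgr, hx⟩)
        · exact Or.inl h1
        · rcases List.mem_cons.mp hgr with rfl | hgr
          · exact absurd hx hng
          · exact Or.inr ⟨gr, hgr, hx⟩

theorem pvBestB_none (first : PySem.Dict Int Int) :
    ∀ (gold_sets : List (List Int)), (∀ group ∈ gold_sets, group.isEmpty = true) →
      pvBestB first gold_sets = none := by
  intro gs
  induction gs with
  | nil => intro _; rfl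
  | cons g rest ih =>
    intro h
    have hE := h g (List.mem_cons_self ..)
    have hskip : pvBestStep first none g = none := by
      unfold pvBestStep
      simp [hE]
    unfold pvBestB
    rw [List.foldl_cons]
    show (List.foldl (pvBestStep first) (pvBestStep first none g) rest) = none
    rw [hskip]
    exact ih (fun x hx => h x (List.mem_cons_of_mem _ hx))

theorem hitA_iff (doc_ids : List Int) (gold_sets : List (List Int)) (k : Int) :
    (((gold_sets.filter (fun group => !group.isEmpty)).map (fun group => PySem.Set.ofList group)).any
        (fun group => PySem.Set.issubset group (PySem.Set.ofList (PySem.List.slice doc_ids none (some k))))) = true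
      ↔ ∃ group ∈ gold_sets, group ≠ [] ∧ ∀ g ∈ group, g ∈ doc_ids.take (pvCut doc_ids.length k) := by
  rw [List.any_eq_true]
  constructor
  · rintro ⟨s, hs, hsub⟩
    obtain ⟨group, hgmem0, rfl⟩ := List.mem_map.mp hs
    obtain ⟨hgm, hgne⟩ := List.mem_filter.mp hgmem0
    refine ⟨group, hgm, by simpa [List.isEmpty_iff] using hgne, ?_⟩
    intro g hg
    have hmem := (PySem.Set.issubset_iff _ _).mp hsub g ((PySem.Set.mem_ofList _ _).mpr hg)
    rw [PySem.Set.mem_ofList, pvSlice_cut] at hmem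
    exact hmem
  · rintro ⟨group, hgm, hgne, hall⟩
    refine ⟨PySem.Set.ofList group,
      List.mem_map.mpr ⟨group, List.mem_filter.mpr ⟨hgm, by simpa [List.isEmpty_iff] using hgne⟩, rfl⟩, ?_⟩
    rw [PySem.Set.issubset_iff]
    intro g hg
    rw [PySem.Set.mem_ofList] at hg
    rw [PySem.Set.mem_ofList, pvSlice_cut]
    exact hall g hg

-- the per-k values of the two ports agree for every k outside D_'s condition at k
theorem valEq (doc_ids : List Int) (gold_sets : List (List Int)) (k : Int)
    (hD : k < 0 → ¬ ∃ group ∈ gold_sets, group ≠ [] ∧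
      ∀ g ∈ group, g ∈ doc_ids.take (doc_ids.length - (-k).toNat)) :
    (((gold_sets.filter (fun group => !group.isEmpty)).map (fun group => PySem.Set.ofList group)).any
        (fun group => PySem.Set.issubset group (PySem.Set.ofList (PySem.List.slice doc_ids none (some k)))))
      = (match pvBestB (pvFirst doc_ids) gold_sets with
         | none => false
         | some b => decide (b < k)) := by
  have hmatch : ((match pvBestB (pvFirst doc_ids) gold_sets with
      | none => false
      | some b => decide (b < k)) = true)
      ↔ (∃ b, pvBestB (pvFirst doc_ids) gold_sets = some b ∧ b < k) := by
    cases h : pvBestB (pvFirst doc_ids) gold_sets with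
    | none => simp
    | some b => simp
  rw [Bool.eq_iff_iff, hmatch, hitA_iff, pvBestB_lt_iff]
  by_cases hk : 0 ≤ k
  · have hcut : pvCut doc_ids.length k = min k.toNat doc_ids.length := by
      unfold pvCut; rw [if_pos hk]
    constructor
    · rintro ⟨group, hgm, hgne, hall⟩
      refine ⟨group, hgm, hgne, ?_⟩
      intro g hg
      obtain ⟨j, hj, hjm⟩ := (mem_take_iff_index? doc_ids g _).mp (hall g hg)
      rw [hcut] at hjm
      exact ⟨(j : Int), by rw [pvFirst_get?, hj]; rfl, by omega⟩
    · rintro ⟨group, hgm, hgne, hall⟩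
      refine ⟨group, hgm, hgne, ?_⟩
      intro g hg
      obtain ⟨i, hi, hik⟩ := hall g hg
      rw [pvFirst_get?] at hi
      cases hx : PySem.List.index? doc_ids g with
      | none => rw [hx] at hi; exact absurd hi (by simp)
      | some j =>
        rw [hx] at hi
        simp only [Option.map_some, Option.some.injEq] at hi
        obtain ⟨hjl, -, -⟩ := PySem.List.getElem_of_index?_eq_some hx
        refine (mem_take_iff_index? doc_ids g _).mpr ⟨j, hx, ?_⟩
        rw [hcut]
        omega
  · have hcut : pvCut doc_ids.length k = doc_ids.length - (-k).toNat := by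
      unfold pvCut; rw [if_neg hk]
    constructor
    · rintro ⟨group, hgm, hgne, hall⟩
      rw [hcut] at hall
      exact absurd ⟨group, hgm, hgne, hall⟩ (hD (by omega))
    · rintro ⟨group, hgm, hgne, hall⟩
      obtain ⟨g, hg⟩ := List.exists_mem_of_ne_nil group hgne
      obtain ⟨i, hi, hik⟩ := hall g hg
      rw [pvFirst_get?] at hi
      cases hx : PySem.List.index? doc_ids g with
      | none => rw [hx] at hi; exact absurd hi (by simp)
      | some j =>
        rw [hx] at hi
        simp only [Option.map_some, Option.some.injEq] at hi
        omega

-- ===== VERDICT (by name: the statements are the Claim_ definitions above) =====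
theorem compute_hits_py_spec : Claim_unchanged_compute_hits_py := by
  intro doc_ids gold_sets k_values _ hnd
  have hD : ∀ k ∈ k_values, k < 0 → ¬ ∃ group ∈ gold_sets, group ≠ [] ∧
      ∀ g ∈ group, g ∈ doc_ids.take (doc_ids.length - (-k).toNat) := by
    intro k hk hkneg hex
    exact hnd ⟨k, hk, hkneg, hex⟩
  unfold compute_hits_py compute_hits_py_alt
  dsimp only
  by_cases h1 : gold_sets = []
  · rw [if_pos h1, pvBestB_none (pvFirst doc_ids) gold_sets (by simp [h1])]
  · rw [if_neg h1]
    by_cases h2 : (gold_sets.filter (fun group => !group.isEmpty)).map (fun group => PySem.Set.ofList group) = []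
    · rw [if_pos h2]
      have hall : ∀ group ∈ gold_sets, group.isEmpty = true := by
        rw [List.map_eq_nil_iff, List.filter_eq_nil_iff] at h2
        intro g hg
        simpa using h2 g hg
      rw [pvBestB_none (pvFirst doc_ids) gold_sets hall]
    · rw [if_neg h2]
      refine congrArg PySem.Dict.items ?_
      refine PySem.List.foldl_congr_mem _ _ _ _ ?_
      intro acc k hk
      rw [valEq doc_ids gold_sets k (hD k hk)]

theorem compute_hits_py_changed : Claim_changed_compute_hits_py := by
  unfold Claim_changed_compute_hits_py; decide
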